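-- pv_equiv track=rewrite | github.com/KopaihorodskaDaria/pythonProject_CW | min_column_max_row.py | min_column
-- ===== SOURCE A (Python) =====
-- def min_column(y, n, K, active_columns):
--     min_count = float('inf')
--     min_column_index = -1
--
--     for j in range(K):
--         if active_columns[j] == 1:
--             count = sum(y[i][j] for i in range(n))
--             if count < min_count:
--                 min_count = count
--                 min_column_index = j
--
--     return min_column_index
-- ===== SOURCE B (Python) =====
-- def min_column(y, n, K, active_columns):
--     # Different decomposition: first collect the active column indices, then
--     # accumulate all column sums in one row-major pass, then select the winner.
--     active = [j for j in range(K) if active_columns[j] == 1]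
--     if not active:
--         return -1
--     sums = {j: 0 for j in active}
--     for i in range(n):
--         row = y[i]
--         for j in active:
--             sums[j] += row[j]
--     best = None
--     best_index = -1
--     for j in active:
--         if best is None or sums[j] < best:
--             best = sums[j]
--             best_index = j
--     return best_index
-- ===== Notes on version B (the rewrite author's own statement) =====
-- stated objective: alternative
-- what changed: B inverts the loop nesting: it gathers the active column indices once, accumulates all column sums in a single row-major pass over the matrix (rows outer, active columns inner), and then selects the first strict-minimum column in a separate pass, instead of A's column-outer loop that rescans all rows per column and interleaves accumulation with selection.
import Mathlib
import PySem

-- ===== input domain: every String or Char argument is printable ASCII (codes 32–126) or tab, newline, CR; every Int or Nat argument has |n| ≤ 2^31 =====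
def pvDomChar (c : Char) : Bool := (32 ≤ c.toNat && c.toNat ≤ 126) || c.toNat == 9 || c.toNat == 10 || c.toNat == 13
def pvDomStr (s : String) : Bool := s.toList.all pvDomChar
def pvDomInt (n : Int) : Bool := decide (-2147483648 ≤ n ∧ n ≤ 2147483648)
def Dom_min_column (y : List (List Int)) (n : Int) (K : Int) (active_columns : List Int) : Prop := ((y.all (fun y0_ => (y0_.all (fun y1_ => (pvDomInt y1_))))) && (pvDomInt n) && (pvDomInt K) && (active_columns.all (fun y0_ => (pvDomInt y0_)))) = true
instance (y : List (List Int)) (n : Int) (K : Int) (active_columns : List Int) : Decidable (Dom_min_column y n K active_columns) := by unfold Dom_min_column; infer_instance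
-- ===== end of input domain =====

-- ===== PORT A =====
-- A: column-outer loop; float('inf') sentinel ported as Option Int (none = inf).
def min_column (y : List (List Int)) (n : Int) (K : Int) (active_columns : List Int) : Int :=
  ((PySem.List.pyRange 0 K 1).foldl (fun (st : Option Int × Int) j =>
      if PySem.List.pyGetD active_columns j 0 = 1 then
        let count := (PySem.List.pyRange 0 n 1).foldl
          (fun acc i => acc + PySem.List.pyGetD (PySem.List.pyGetD y i []) j 0) 0
        match st.1 with
        | none => (some count, j)
        | some m => if count < m then (some count, j) else st
      else st) ((none : Option Int), -1)).2

-- ===== PORT B =====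
-- B: gather active columns, one row-major accumulation pass into a dict, then select.
def min_column_alt (y : List (List Int)) (n : Int) (K : Int) (active_columns : List Int) : Int :=
  let active := (PySem.List.pyRange 0 K 1).filter
    (fun j => decide (PySem.List.pyGetD active_columns j 0 = 1))
  if active.isEmpty then -1
  else
    let sums0 : PySem.Dict Int Int := active.foldl (fun d j => d.insert j 0) PySem.Dict.empty
    let sums := (PySem.List.pyRange 0 n 1).foldl (fun d i =>
        let row := PySem.List.pyGetD y i []
        active.foldl (fun d j => d.insert j (d.getD j 0 + PySem.List.pyGetD row j 0)) d) sums0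
    (active.foldl (fun (st : Option Int × Int) j =>
        let s := sums.getD j 0
        match st.1 with
        | none => (some s, j)
        | some m => if s < m then (some s, j) else st) ((none : Option Int), -1)).2

-- ===== PRECONDITION & SPEC =====
-- Pre_ excludes exactly the inputs where Python A raises IndexError: it needs
-- active_columns[j] for every j < K, and y[i][j] for every i < n at each active j.
def Pre_min_column (y : List (List Int)) (n : Int) (K : Int) (active_columns : List Int) : Prop :=
  K ≤ (active_columns.length : Int) ∧
  ∀ j < active_columns.length, (j : Int) < K → active_columns.getD j 0 = 1 →
    n ≤ (y.length : Int) ∧ ∀ i < y.length, (i : Int) < n → j < (y.getD i []).length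
instance (y : List (List Int)) (n : Int) (K : Int) (active_columns : List Int) : Decidable (Pre_min_column y n K active_columns) := by unfold Pre_min_column; infer_instance
def pvWitness_min_column : List (List Int) × Int × Int × List Int := ([[3, 1], [2, 4]], 2, 2, [1, 1])
def Spec_min_column (y : List (List Int)) (n : Int) (K : Int) (active_columns : List Int) (out : Int) : Prop := out = min_column_alt y n K active_columns
instance (y : List (List Int)) (n : Int) (K : Int) (active_columns : List Int) (out : Int) : Decidable (Spec_min_column y n K active_columns out) := by unfold Spec_min_column; infer_instance

-- ===== CLAIM (what is proved, stated in full; the proofs are below) =====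
def Claim_equal_min_column : Prop := ∀ (y : List (List Int)) (n : Int) (K : Int) (active_columns : List Int), Dom_min_column y n K active_columns → Pre_min_column y n K active_columns → Spec_min_column y n K active_columns (min_column y n K active_columns)

-- ===== LEMMAS AND PROOFS =====

-- a fold of inserts only touches keys it inserts
theorem getD_foldl_insert_of_not_mem (g : PySem.Dict Int Int → Int → Int)
    (js : List Int) (d : PySem.Dict Int Int) (j : Int) (hj : j ∉ js) :
    (js.foldl (fun d x => d.insert x (g d x)) d).getD j 0 = d.getD j 0 := by
  induction js generalizing d with
  | nil => rfl
  | cons a js ih =>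
    simp only [List.foldl_cons]
    rw [ih _ (fun h => hj (List.mem_cons_of_mem _ h)),
        PySem.Dict.getD_insert_of_ne _ _ _ (fun h => hj (by rw [h]; exact List.mem_cons_self))]

-- initialisation pass: every listed key starts at 0
theorem getD_foldl_insert_zero (js : List Int) (d : PySem.Dict Int Int) (j : Int)
    (hj : j ∈ js) : (js.foldl (fun d x => d.insert x (0 : Int)) d).getD j 0 = 0 := by
  induction js generalizing d with
  | nil => cases hj
  | cons a js ih =>
    simp only [List.foldl_cons]
    by_cases h : j ∈ js
    · exact ih _ h
    · have hja : j = a := by rcases List.mem_cons.1 hj with h' | h' <;> [exact h'; exact absurd h' h]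
      rw [getD_foldl_insert_of_not_mem (fun _ _ => (0 : Int)) js _ j h,
          PySem.Dict.getD_insert, if_pos hja]

-- one inner (per-row) pass adds v j to each listed key, once (keys are distinct)
theorem getD_foldl_insert_add (v : Int → Int) (js : List Int) (d : PySem.Dict Int Int)
    (j : Int) (hnd : js.Nodup) (hj : j ∈ js) :
    (js.foldl (fun d x => d.insert x (d.getD x 0 + v x)) d).getD j 0 = d.getD j 0 + v j := by
  induction js generalizing d with
  | nil => cases hj
  | cons a js ih =>
    simp only [List.foldl_cons]
    rcases List.mem_cons.1 hj with h | h
    · subst h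
      have hnot : j ∉ js := (List.nodup_cons.1 hnd).1
      rw [getD_foldl_insert_of_not_mem (fun d x => d.getD x 0 + v x) js _ j hnot,
          PySem.Dict.getD_insert, if_pos rfl]
    · have hne : j ≠ a := fun he => (List.nodup_cons.1 hnd).1 (he ▸ h)
      rw [ih _ (List.nodup_cons.1 hnd).2 h, PySem.Dict.getD_insert_of_ne _ _ _ hne]

-- the row-major accumulation computes the column sum of each active column
theorem getD_rows_foldl (val : Int → Int → Int) (active : List Int) (hnd : active.Nodup)
    (rows : List Int) (d : PySem.Dict Int Int) (j : Int) (hj : j ∈ active) :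
    (rows.foldl (fun d i =>
        active.foldl (fun d x => d.insert x (d.getD x 0 + val i x)) d) d).getD j 0
      = d.getD j 0 + (rows.map (fun i => val i j)).sum := by
  induction rows generalizing d with
  | nil => simp
  | cons r rows ih =>
    simp only [List.foldl_cons, List.map_cons, List.sum_cons]
    rw [ih _, getD_foldl_insert_add (val r) active d j hnd hj]
    ring

-- ===== VERDICT (by name: the statement is the Claim_ definition above) =====
theorem min_column_spec : Claim_equal_min_column := by
  intro y n K active_columns _ _
  unfold Spec_min_column min_column min_column_alt
  have hA := PySem.List.foldl_ite_eq_foldl_filter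
      (fun j => PySem.List.pyGetD active_columns j 0 = 1)
      (fun (st : Option Int × Int) j =>
        let count := (PySem.List.pyRange 0 n 1).foldl
          (fun acc i => acc + PySem.List.pyGetD (PySem.List.pyGetD y i []) j 0) 0
        match st.1 with
        | none => (some count, j)
        | some m => if count < m then (some count, j) else st)
      (PySem.List.pyRange 0 K 1) ((none : Option Int), -1)
  rw [hA]
  have hnd : ((PySem.List.pyRange 0 K 1).filter
      (fun j => decide (PySem.List.pyGetD active_columns j 0 = 1))).Nodup :=
    (PySem.List.nodup_pyRange_one 0 K).filter _
  by_cases he : ((PySem.List.pyRange 0 K 1).filter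
      (fun j => decide (PySem.List.pyGetD active_columns j 0 = 1))).isEmpty = true
  · rw [List.isEmpty_iff.1 he]
    simp
  · simp only [if_neg he]
    apply congrArg Prod.snd
    apply PySem.List.foldl_congr_mem
    intro st j hj
    have hsum :
        ((PySem.List.pyRange 0 n 1).foldl (fun d i =>
            ((PySem.List.pyRange 0 K 1).filter
              (fun j => decide (PySem.List.pyGetD active_columns j 0 = 1))).foldl (fun d x =>
              d.insert x (d.getD x 0 + PySem.List.pyGetD (PySem.List.pyGetD y i []) x 0)) d)
          (((PySem.List.pyRange 0 K 1).filter
              (fun j => decide (PySem.List.pyGetD active_columns j 0 = 1))).foldl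
            (fun d j => d.insert j (0 : Int)) PySem.Dict.empty)).getD j 0
        = (PySem.List.pyRange 0 n 1).foldl
            (fun acc i => acc + PySem.List.pyGetD (PySem.List.pyGetD y i []) j 0) 0 := by
      rw [getD_rows_foldl (fun i x => PySem.List.pyGetD (PySem.List.pyGetD y i []) x 0)
            _ hnd (PySem.List.pyRange 0 n 1) _ j hj,
          getD_foldl_insert_zero _ _ j hj,
          PySem.List.foldl_add]
    simp only [hsum]
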